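-- pv_equiv track=rewrite | github.com/epilanthanomai/aoc2020 | day16.py | calculate_range_masks
-- ===== SOURCE A (Python) =====
-- def calculate_range_masks(fields):
--     result = []
--     for field_name, bounds in fields:
--         mask = 0
--         for low, high in bounds:
--             for i in range(low, high + 1):
--                 mask |= 2 ** i
--         result.append((field_name, mask))
--     return result
-- ===== SOURCE B (Python) =====
-- def _or_all(values):
--     mask = 0
--     for v in values:
--         mask |= v
--     return mask
--
--
-- def calculate_range_masks(fields):
--     # closed-form contiguous bit block per (low, high) instead of setting bits one by one
--     return [(name, _or_all((1 << (high + 1)) - (1 << low)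
--                            for low, high in bounds if low <= high))
--             for name, bounds in fields]
-- ===== Notes on version B (the rewrite author's own statement) =====
-- stated objective: faster
-- what changed: Replaces the per-integer inner loop that sets one bit per value in each inclusive range with the closed-form contiguous bit block (1<<(high+1))-(1<<low) OR-ed per bound, so cost depends on the number of bounds, not the total size of the ranges.
import Mathlib
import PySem

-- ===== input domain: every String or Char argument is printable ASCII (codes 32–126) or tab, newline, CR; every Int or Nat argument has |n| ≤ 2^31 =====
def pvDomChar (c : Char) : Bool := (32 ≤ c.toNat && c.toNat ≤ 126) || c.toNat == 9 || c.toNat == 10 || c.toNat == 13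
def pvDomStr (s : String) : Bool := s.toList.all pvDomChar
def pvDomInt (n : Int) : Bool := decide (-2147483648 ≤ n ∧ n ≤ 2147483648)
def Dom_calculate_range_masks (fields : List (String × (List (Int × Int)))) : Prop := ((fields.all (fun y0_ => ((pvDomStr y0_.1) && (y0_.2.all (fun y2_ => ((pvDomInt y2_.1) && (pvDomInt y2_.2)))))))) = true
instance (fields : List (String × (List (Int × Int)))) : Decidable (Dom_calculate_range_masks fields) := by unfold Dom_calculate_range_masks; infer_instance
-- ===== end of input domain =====

-- B replaces A's bit-by-bit inner loop over every integer of each inclusive range by the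
-- closed-form contiguous block (1 <<< (high+1)) - (1 <<< low) OR-ed once per bound (faster).

-- ===== PORT A =====
-- inner loops: 'for i in range(low, high+1): mask |= 2 ** i' then 'for low, high in bounds';
-- 2 ** i ported as 2 ^ i.toNat, exact for i ≥ 0 (Pre_ excludes negative i, where Python raises TypeError)
def calculate_range_masks (fields : List (String × (List (Int × Int)))) : List (String × Int) :=
  fields.foldl
    (fun result f =>
      result ++ [(f.1,
        f.2.foldl
          (fun mask b =>
            (PySem.List.pyRange b.1 (b.2 + 1) 1).foldl
              (fun m i => PySem.Int.bor m ((2 : Int) ^ i.toNat)) mask)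
          0)])
    []

-- ===== PORT B =====
-- helper _or_all: loop 'mask |= v'
def pvOrAll (values : List Int) : Int :=
  values.foldl (fun mask v => PySem.Int.bor mask v) 0

-- generator '(1 << (high+1)) - (1 << low) for low, high in bounds if low <= high' as filterMap
def calculate_range_masks_alt (fields : List (String × (List (Int × Int)))) : List (String × Int) :=
  fields.map (fun f =>
    (f.1, pvOrAll (f.2.filterMap (fun b =>
      if b.1 ≤ b.2 then some ((1 : Int) <<< (b.2 + 1).toNat - (1 : Int) <<< b.1.toNat) else none))))

-- ===== PRECONDITION & SPEC =====
-- Pre_ excludes exactly the inputs where A raises TypeError: a bound (low, high) with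
-- low < 0 and low ≤ high makes Python evaluate 2 ** low as a float and 'mask |= float' raises.
def Pre_calculate_range_masks (fields : List (String × (List (Int × Int)))) : Prop :=
  ∀ f ∈ fields, ∀ b ∈ f.2, b.1 ≤ b.2 → 0 ≤ b.1
instance (fields : List (String × (List (Int × Int)))) : Decidable (Pre_calculate_range_masks fields) := by
  unfold Pre_calculate_range_masks; infer_instance

def pvWitness_calculate_range_masks : (List (String × (List (Int × Int)))) :=
  [("class", [(0, 3), (2, 5)]), ("row", [(7, 4)])]

def Spec_calculate_range_masks (fields : List (String × (List (Int × Int)))) (out : List (String × Int)) : Prop := out = calculate_range_masks_alt fields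
instance (fields : List (String × (List (Int × Int)))) (out : List (String × Int)) : Decidable (Spec_calculate_range_masks fields out) := by unfold Spec_calculate_range_masks; infer_instance

-- ===== CLAIM (what is proved, stated in full; the proofs are below) =====
def Claim_equal_calculate_range_masks : Prop := ∀ (fields : List (String × (List (Int × Int)))), Dom_calculate_range_masks fields → Pre_calculate_range_masks fields → Spec_calculate_range_masks fields (calculate_range_masks fields)

-- ===== LEMMAS AND PROOFS =====

-- OR of a low power of two into a multiple of the next power is addition (disjoint bits)
theorem pv_pow_lor_mul (l c : Nat) : 2 ^ l ||| 2 ^ (l + 1) * c = 2 ^ l + 2 ^ (l + 1) * c := by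
  induction l generalizing c with
  | zero =>
      have h : (1 : Nat) ||| 2 * c = Nat.bit true 0 ||| Nat.bit false c := by
        simp [Nat.bit]
      rw [pow_zero, pow_one, h, Nat.lor_bit]
      simp [Nat.bit]; omega
  | succ l ih =>
      have h1 : 2 ^ (l + 1) = Nat.bit false (2 ^ l) := by simp [Nat.bit]; ring
      have h2 : 2 ^ (l + 1 + 1) * c = Nat.bit false (2 ^ (l + 1) * c) := by simp [Nat.bit]; ring
      rw [h1, h2, Nat.lor_bit]
      simp [Nat.bit, ih c]; ring

-- OR of 2^l with the block [l+1, l+n] gives the block [l, l+n]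
theorem pv_pow_lor_block (l n : Nat) :
    2 ^ l ||| (2 ^ (l + 1 + n) - 2 ^ (l + 1)) = 2 ^ (l + n + 1) - 2 ^ l := by
  have hd : 2 ^ (l + 1 + n) - 2 ^ (l + 1) = 2 ^ (l + 1) * (2 ^ n - 1) := by
    rw [Nat.mul_sub, mul_one, ← pow_add]
  have h1 : (1 : Nat) ≤ 2 ^ n := Nat.one_le_two_pow
  have h2 : 2 ^ (l + 1) ≤ 2 ^ (l + 1) * 2 ^ n := Nat.le_mul_of_pos_right _ (Nat.pos_of_ne_zero (by positivity))
  have h3 : 2 ^ (l + 1) * 2 ^ n = 2 ^ (l + n + 1) := by rw [← pow_add]; ring_nf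
  have h4 : 2 ^ l ≤ 2 ^ (l + 1) := Nat.pow_le_pow_right (by norm_num) (by omega)
  rw [hd, pv_pow_lor_mul l (2 ^ n - 1), Nat.mul_sub, mul_one, h3]
  omega

-- A's inner range loop from a nonnegative accumulator computes the contiguous block OR
theorem pv_range_fold (n : Nat) : ∀ (l M : Nat),
    (PySem.List.pyRange (l : Int) ((l : Int) + n) 1).foldl
        (fun m i => PySem.Int.bor m ((2 : Int) ^ i.toNat)) ((M : Nat) : Int)
      = ((M ||| (2 ^ (l + n) - 2 ^ l) : Nat) : Int) := by
  induction n with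
  | zero =>
      intro l M
      rw [show ((l : Int) + (0 : Nat)) = (l : Int) by push_cast; ring,
        PySem.List.pyRange_one_eq_nil (le_refl _)]
      simp
  | succ n ih =>
      intro l M
      have hcons : PySem.List.pyRange (l : Int) ((l : Int) + ((n : Nat) + 1 : Nat)) 1
          = (l : Int) :: PySem.List.pyRange ((l : Int) + 1) ((l : Int) + ((n : Nat) + 1 : Nat)) 1 :=
        PySem.List.pyRange_one_cons (by push_cast; omega)
      rw [hcons]
      simp only [List.foldl_cons]
      have hstep : PySem.Int.bor ((M : Nat) : Int) ((2 : Int) ^ ((l : Int)).toNat)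
          = (((M ||| 2 ^ l : Nat)) : Int) := by
        have : ((2 : Int) ^ ((l : Int)).toNat) = ((2 ^ l : Nat) : Int) := by
          push_cast; simp
        rw [this, PySem.Int.bor_natCast]
      rw [hstep]
      have harg : (l : Int) + ((n : Nat) + 1 : Nat) = ((l + 1 : Nat) : Int) + (n : Nat) := by
        push_cast; ring
      rw [harg, show ((l : Int) + 1) = ((l + 1 : Nat) : Int) by push_cast; ring,
        ih (l + 1) (M ||| 2 ^ l)]
      congr 1
      rw [Nat.lor_assoc]
      congr 1
      have := pv_pow_lor_block l n
      omega

-- per-field: A's bounds loop equals B's filterMap/or fold, from any nonnegative start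
theorem pv_bounds_fold (bounds : List (Int × Int))
    (hb : ∀ b ∈ bounds, b.1 ≤ b.2 → 0 ≤ b.1) : ∀ (M : Nat),
    bounds.foldl
        (fun mask b =>
          (PySem.List.pyRange b.1 (b.2 + 1) 1).foldl
            (fun m i => PySem.Int.bor m ((2 : Int) ^ i.toNat)) mask) ((M : Nat) : Int)
      = (bounds.filterMap (fun b =>
          if b.1 ≤ b.2 then some ((1 : Int) <<< (b.2 + 1).toNat - (1 : Int) <<< b.1.toNat) else none)).foldl
          (fun mask v => PySem.Int.bor mask v) ((M : Nat) : Int) := by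
  induction bounds with
  | nil => intro M; rfl
  | cons b rest ih =>
      intro M
      have hrest : ∀ x ∈ rest, x.1 ≤ x.2 → 0 ≤ x.1 := fun x hx => hb x (List.mem_cons_of_mem _ hx)
      by_cases hle : b.1 ≤ b.2
      · have h0 : 0 ≤ b.1 := hb b (List.mem_cons_self) hle
        set l : Nat := b.1.toNat with hl
        set n : Nat := (b.2 + 1 - b.1).toNat with hn
        have hb1 : b.1 = (l : Int) := by omega
        have hb2 : b.2 + 1 = (l : Int) + (n : Nat) := by omega
        simp only [List.foldl_cons, List.filterMap_cons, hle, if_pos]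
        rw [hb1, hb2, pv_range_fold n l M]
        have e1 : (1 : Int) <<< ((((l : Int) + (n : Nat)).toNat : Nat) : Int) = ((2 ^ (l + n) : Nat) : Int) := by
          rw [show ((l : Int) + (n : Nat)).toNat = l + n by omega]
          exact Int.one_shiftLeft _
        have e2 : (1 : Int) <<< ((((l : Int)).toNat : Nat) : Int) = ((2 ^ l : Nat) : Int) := by
          rw [show ((l : Int)).toNat = l by omega]
          exact Int.one_shiftLeft _
        have hle2 : 2 ^ l ≤ 2 ^ (l + n) := Nat.pow_le_pow_right (by norm_num) (by omega)
        have hval : PySem.Int.bor ((M : Nat) : Int)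
              ((1 : Int) <<< ((((l : Int) + (n : Nat)).toNat : Nat) : Int) - (1 : Int) <<< ((((l : Int)).toNat : Nat) : Int))
            = ((M ||| (2 ^ (l + n) - 2 ^ l) : Nat) : Int) := by
          rw [e1, e2, show ((2 ^ (l + n) : Nat) : Int) - ((2 ^ l : Nat) : Int)
              = (((2 ^ (l + n) - 2 ^ l : Nat)) : Int) by omega, PySem.Int.bor_natCast]
        rw [hval]
        exact ih hrest (M ||| (2 ^ (l + n) - 2 ^ l))
      · have hnil : PySem.List.pyRange b.1 (b.2 + 1) 1 = [] :=
          PySem.List.pyRange_one_eq_nil (by omega)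
        simp only [List.foldl_cons, List.filterMap_cons, hle, hnil, List.foldl_nil,
          if_false]
        exact ih hrest M

-- folding append-of-singletons is map
theorem pv_foldl_append_map (fields : List (String × (List (Int × Int))))
    (g : (String × (List (Int × Int))) → (String × Int)) :
    ∀ acc, fields.foldl (fun r f => r ++ [g f]) acc = acc ++ fields.map g := by
  induction fields with
  | nil => intro acc; simp
  | cons f rest ih => intro acc; simp [ih]

-- ===== VERDICT (by name: the statement is the Claim_ definition above) =====
theorem calculate_range_masks_spec : Claim_equal_calculate_range_masks := by
  intro fields _ hpre
  unfold Spec_calculate_range_masks calculate_range_masks calculate_range_masks_alt pvOrAll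
  rw [pv_foldl_append_map, List.nil_append]
  apply List.map_congr_left
  intro f hf
  have := pv_bounds_fold f.2 (hpre f hf) 0
  simpa using this
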